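-- pv_equiv track=rewrite | github.com/dataholic0/Algorithm_Test | Baekjoon/sugar.py | solution
-- ===== SOURCE A (Python) =====
-- def solution(weight):
--
-- 	answer = [0,-1,-1]
--
-- 	for i in range(3, weight+1):
--
-- 		if i>=5 and answer[i-5] != -1:
-- 			answer.append(1+answer[i-5])
-- 		elif answer[i-3] != -1:
-- 			answer.append(1+answer[i-3])
-- 		else:
-- 			answer.append(-1)
--
-- 	return answer[-1]
-- ===== SOURCE B (Python) =====
-- def solution(weight):
--     if weight < 3 or weight in (4, 7):
--         return -1
--     return weight // 5 + (0, 1, 2, 1, 2)[weight % 5]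
-- ===== Notes on version B (the rewrite author's own statement) =====
-- stated objective: faster
-- what changed: Replaced the O(n) bottom-up DP loop over a growing list with an O(1) closed form: quotient by five plus a five-entry remainder table, with a sentinel result for the few impossible weights.
import Mathlib
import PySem

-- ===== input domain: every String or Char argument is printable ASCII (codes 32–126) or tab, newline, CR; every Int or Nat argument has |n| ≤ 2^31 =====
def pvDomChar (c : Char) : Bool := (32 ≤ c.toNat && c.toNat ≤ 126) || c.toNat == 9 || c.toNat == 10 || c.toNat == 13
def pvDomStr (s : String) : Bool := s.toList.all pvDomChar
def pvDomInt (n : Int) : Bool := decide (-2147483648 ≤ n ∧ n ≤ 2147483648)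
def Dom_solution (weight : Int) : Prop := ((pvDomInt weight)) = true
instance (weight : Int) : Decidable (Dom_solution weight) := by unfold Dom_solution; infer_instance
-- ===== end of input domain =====

-- B replaces A's O(n) dynamic-programming loop by an O(1) closed form (weight//5 plus a remainder table).

-- ===== PORT A =====
-- one loop iteration: append the DP value for index i to the accumulator list
def stepA (acc : List Int) (i : Int) : List Int :=
  if 5 ≤ i ∧ (PySem.List.pyGet? acc (i - 5)).getD 0 ≠ -1 then
    acc ++ [1 + (PySem.List.pyGet? acc (i - 5)).getD 0]
  else if (PySem.List.pyGet? acc (i - 3)).getD 0 ≠ -1 then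
    acc ++ [1 + (PySem.List.pyGet? acc (i - 3)).getD 0]
  else
    acc ++ [-1]

def solution (weight : Int) : Int :=
  let answer : List Int := (PySem.List.pyRange 3 (weight + 1) 1).foldl stepA [0, -1, -1]
  (PySem.List.pyGet? answer (-1)).getD 0

-- ===== PORT B =====
def solution_alt (weight : Int) : Int :=
  if weight < 3 ∨ weight = 4 ∨ weight = 7 then -1
  else PySem.Int.floordiv weight 5
       + (PySem.List.pyGet? [0, 1, 2, 1, 2] (PySem.Int.mod weight 5)).getD 0

-- ===== PRECONDITION & SPEC =====
def Spec_solution (weight : Int) (out : Int) : Prop := out = solution_alt weight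
instance (weight : Int) (out : Int) : Decidable (Spec_solution weight out) := by unfold Spec_solution; infer_instance

-- ===== CLAIM (what is proved, stated in full; the proofs are below) =====
def Claim_equal_solution : Prop := ∀ (weight : Int), Dom_solution weight → Spec_solution weight (solution weight)

-- ===== LEMMAS AND PROOFS =====

-- remainder table of B, as a function on Nat
def tB (r : Nat) : Int :=
  if r = 0 then 0 else if r = 1 then 1 else if r = 2 then 2 else if r = 3 then 1 else 2

-- closed-form value of A's DP cell k
def fDP (k : Nat) : Int :=
  if k = 0 then 0
  else if k = 1 ∨ k = 2 ∨ k = 4 ∨ k = 7 then -1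
  else ((k / 5 : Nat) : Int) + tB (k % 5)

lemma fDP_nonneg_of (k : Nat) (h3 : 3 ≤ k) (h4 : k ≠ 4) (h7 : k ≠ 7) : 0 ≤ fDP k := by
  unfold fDP tB
  have : ¬(k = 0) := by omega
  have : ¬(k = 1 ∨ k = 2 ∨ k = 4 ∨ k = 7) := by omega
  simp [*]
  split_ifs <;> omega

-- the DP recurrence step produces exactly fDP k
lemma fDP_step (k : Nat) (h : 3 ≤ k) :
    (if 5 ≤ k ∧ fDP (k - 5) ≠ -1 then 1 + fDP (k - 5)
     else if fDP (k - 3) ≠ -1 then 1 + fDP (k - 3) else (-1 : Int)) = fDP k := by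
  by_cases hk : k < 13
  · interval_cases k <;> decide
  · -- k ≥ 13: the 5-branch always fires and shifts the closed form by one bag
    have h5 : 5 ≤ k := by omega
    have hne : fDP (k - 5) ≠ -1 := by
      have := fDP_nonneg_of (k - 5) (by omega) (by omega) (by omega)
      omega
    have hform : fDP (k - 5) = ((k - 5) / 5 : Nat) + tB ((k - 5) % 5) := by
      unfold fDP
      have h0 : ¬((k - 5) = 0) := by omega
      have h1 : ¬((k - 5) = 1 ∨ (k - 5) = 2 ∨ (k - 5) = 4 ∨ (k - 5) = 7) := by omega
      simp [h0, h1]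
    have hkform : fDP k = ((k / 5 : Nat) : Int) + tB (k % 5) := by
      unfold fDP
      have h0 : ¬(k = 0) := by omega
      have h1 : ¬(k = 1 ∨ k = 2 ∨ k = 4 ∨ k = 7) := by omega
      simp [h0, h1]
    have hdiv : (k - 5) / 5 + 1 = k / 5 := by omega
    have hmod : (k - 5) % 5 = k % 5 := by omega
    rw [if_pos (show 5 ≤ k ∧ fDP (k - 5) ≠ -1 from ⟨h5, hne⟩)]
    rw [hform, hkform, hmod, ← hdiv]
    push_cast
    ring

-- invariant: after processing 3..n the list is [fDP 0, …, fDP n]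
lemma loopA_eq (n : Nat) (h : 2 ≤ n) :
    (PySem.List.pyRange 3 ((n : Int) + 1) 1).foldl stepA [0, -1, -1]
      = (List.range (n + 1)).map fDP := by
  induction n, h using Nat.le_induction with
  | base => decide
  | succ n hn ih =>
    have hsplit : PySem.List.pyRange 3 ((n : Int) + 1 + 1) 1
        = PySem.List.pyRange 3 ((n : Int) + 1) 1 ++ [(n : Int) + 1] := by
      exact PySem.List.pyRange_one_succ_right (by omega)
    have hc : (((n + 1 : Nat) : Int) + 1) = ((n : Int) + 1 + 1) := by push_cast; ring
    rw [hc, hsplit, List.foldl_append, ih]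
    set L := (List.range (n + 1)).map fDP with hL
    have hlen : L.length = n + 1 := by simp [hL]
    have hget : ∀ (j : Nat), j < n + 1 → (PySem.List.pyGet? L ((j : Nat) : Int)).getD 0 = fDP j := by
      intro j hj
      rw [PySem.List.pyGet?_natCast]
      simp [hL, hj]
    have hstep : stepA L ((n : Int) + 1)
        = L ++ [if 5 ≤ n + 1 ∧ fDP (n + 1 - 5) ≠ -1 then 1 + fDP (n + 1 - 5)
                else if fDP (n + 1 - 3) ≠ -1 then 1 + fDP (n + 1 - 3) else (-1 : Int)] := by
      unfold stepA
      have hg3 : (PySem.List.pyGet? L ((n : Int) + 1 - 3)).getD 0 = fDP (n + 1 - 3) := by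
        have hc : ((n : Int) + 1 - 3) = ((n + 1 - 3 : Nat) : Int) := by omega
        rw [hc, hget _ (by omega)]
      by_cases h5 : 5 ≤ n + 1
      · have hg5 : (PySem.List.pyGet? L ((n : Int) + 1 - 5)).getD 0 = fDP (n + 1 - 5) := by
          have hc : ((n : Int) + 1 - 5) = ((n + 1 - 5 : Nat) : Int) := by omega
          rw [hc, hget _ (by omega)]
        have h5' : (5 : Int) ≤ (n : Int) + 1 := by omega
        simp only [hg5, hg3, h5, h5']
        split_ifs <;> rfl
      · have h5' : ¬((5 : Int) ≤ (n : Int) + 1) := by omega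
        simp only [h5, h5', false_and, if_false]
        simp only [hg3]
        split_ifs <;> rfl
    simp only [List.foldl_cons, List.foldl_nil]
    rw [hstep, fDP_step (n + 1) (by omega)]
    simp [hL, List.range_succ]

-- B's closed form equals fDP on n ≥ 3
lemma alt_eq_fDP (n : Nat) (h : 3 ≤ n) : solution_alt (n : Int) = fDP n := by
  unfold solution_alt fDP
  by_cases h4 : n = 4
  · subst h4; decide
  by_cases h7 : n = 7
  · subst h7; decide
  have hlt : ¬((n : Int) < 3 ∨ (n : Int) = 4 ∨ (n : Int) = 7) := by
    rintro (h | h | h) <;> omega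
  have h0 : ¬(n = 0) := by omega
  have h1 : ¬(n = 1 ∨ n = 2 ∨ n = 4 ∨ n = 7) := by omega
  simp only [hlt, if_false, h0, h1]
  have hfd : PySem.Int.floordiv (n : Int) 5 = ((n / 5 : Nat) : Int) :=
    PySem.Int.floordiv_natCast n 5
  have hmd : PySem.Int.mod (n : Int) 5 = ((n % 5 : Nat) : Int) :=
    PySem.Int.mod_natCast n 5
  rw [hfd, hmd]
  have hr : n % 5 < 5 := by omega
  have : (PySem.List.pyGet? [0, 1, 2, 1, 2] ((n % 5 : Nat) : Int)).getD 0 = tB (n % 5) := by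
    have h5 : n % 5 = 0 ∨ n % 5 = 1 ∨ n % 5 = 2 ∨ n % 5 = 3 ∨ n % 5 = 4 := by omega
    rcases h5 with h | h | h | h | h <;> rw [h] <;> decide
  rw [this]

-- ===== VERDICT (by name: the statement is the Claim_ definition above) =====
theorem solution_spec : Claim_equal_solution := by
  intro weight _
  unfold Spec_solution
  by_cases hlt : weight < 3
  · -- empty loop: A returns answer[-1] = -1; B's first branch
    unfold solution solution_alt
    rw [PySem.List.pyRange_one_eq_nil (by omega)]
    rw [if_pos (Or.inl hlt)]
    decide
  · obtain ⟨n, rfl⟩ : ∃ n : Nat, weight = (n : Int) :=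
      ⟨weight.toNat, by omega⟩
    have hn : 3 ≤ n := by omega
    unfold solution
    rw [loopA_eq n (by omega), alt_eq_fDP n hn]
    show (PySem.List.pyGet? ((List.range (n + 1)).map fDP) (-1)).getD 0 = fDP n
    rw [PySem.List.pyGet?_neg_one]
    rw [List.range_succ, List.map_append]
    simp
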